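-- pv_equiv track=rewrite | github.com/yuripassuelo/py_nadc | test/Testes.py | classifica_idade
-- ===== SOURCE A (Python) =====
-- def classifica_idade( vector ):
--
--     cat = [ "80 anos ou mais" if i == 80 else str(i)+" a "+str(i+4)+" anos" for i in range(0,81,5)]
--
--     lista = [ [80,110] if i == 80 else[i,i+4] for i in range(0,81,5)]
--
--     saida = []
--
--     for i in range(0,len(vector)):
--
--         for j in range(0,len(lista)):
--
--             if vector[i] >= lista[j][0] and vector[i] <= lista[j][1]:
--
--                 saida.append( cat[j])
--
--     return saida
-- ===== SOURCE B (Python) =====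
-- def classifica_idade(vector):
--     cat = ["80 anos ou mais" if i == 80 else str(i) + " a " + str(i + 4) + " anos"
--            for i in range(0, 81, 5)]
--     saida = []
--     for a in vector:
--         if 0 <= a <= 110:
--             saida.append(cat[min(a // 5, 16)])
--     return saida
-- ===== Notes on version B (the rewrite author's own statement) =====
-- stated objective: faster
-- what changed: Replaces A's inner linear scan over all 17 precomputed [low,high] bins with a direct arithmetic bin index min(a//5,16) guarded by a single 0<=a<=110 range check.
import Mathlib
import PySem

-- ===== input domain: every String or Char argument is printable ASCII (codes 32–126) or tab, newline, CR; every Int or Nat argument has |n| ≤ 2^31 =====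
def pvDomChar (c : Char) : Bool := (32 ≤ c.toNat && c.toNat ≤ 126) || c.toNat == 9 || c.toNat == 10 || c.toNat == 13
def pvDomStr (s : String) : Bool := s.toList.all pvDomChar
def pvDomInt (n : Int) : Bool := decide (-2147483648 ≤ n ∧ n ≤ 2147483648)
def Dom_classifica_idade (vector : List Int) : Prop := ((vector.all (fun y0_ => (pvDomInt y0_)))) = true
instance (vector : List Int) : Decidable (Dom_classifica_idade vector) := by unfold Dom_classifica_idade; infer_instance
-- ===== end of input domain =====

-- B replaces A's inner linear scan over the 17 precomputed [low,high] bins by a direct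
-- arithmetic bin index min(a//5, 16) guarded by a single 0 <= a <= 110 range check (objective: faster by a constant factor).

-- ===== PORT A =====
def pvCatA : List String :=
  (PySem.List.pyRange 0 81 5).map (fun i =>
    if i = 80 then "80 anos ou mais"
    else String.ofList (PySem.Int.toChars i ++ (" a ").toList ++ PySem.Int.toChars (i+4) ++ (" anos").toList))

def pvListaA : List (Int × Int) :=
  (PySem.List.pyRange 0 81 5).map (fun i => if i = 80 then ((80:Int),(110:Int)) else (i, i+4))

def pvInnerA (saida : List String) (v : Int) : List String :=
  (PySem.List.pyRange 0 (PySem.List.len pvListaA) 1).foldl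
    (fun saida j =>
      if v ≥ (PySem.List.pyGetD pvListaA j (0,0)).1 ∧ v ≤ (PySem.List.pyGetD pvListaA j (0,0)).2
      then saida ++ [PySem.List.pyGetD pvCatA j ""] else saida)
    saida

def classifica_idade (vector : List Int) : List String :=
  (PySem.List.pyRange 0 (PySem.List.len vector) 1).foldl
    (fun saida i => pvInnerA saida (PySem.List.pyGetD vector i 0)) []

-- ===== PORT B =====
-- Source B builds the same 17-label table itself, so its port carries its own copy.
def pvCatB : List String :=
  (PySem.List.pyRange 0 81 5).map (fun i =>
    if i = 80 then "80 anos ou mais"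
    else String.ofList (PySem.Int.toChars i ++ (" a ").toList ++ PySem.Int.toChars (i+4) ++ (" anos").toList))

def classifica_idade_alt (vector : List Int) : List String :=
  vector.foldl
    (fun saida a =>
      if 0 ≤ a ∧ a ≤ 110
      then saida ++ [PySem.List.pyGetD pvCatB (min (PySem.Int.floordiv a 5) 16) ""] else saida) []


-- ===== PRECONDITION & SPEC =====
def Spec_classifica_idade (vector : List Int) (out : List String) : Prop := out = classifica_idade_alt vector
instance (vector : List Int) (out : List String) : Decidable (Spec_classifica_idade vector out) := by unfold Spec_classifica_idade; infer_instance

-- ===== CLAIM (what is proved, stated in full; the proofs are below) =====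
def Claim_equal_classifica_idade : Prop := ∀ (vector : List Int), Dom_classifica_idade vector → Spec_classifica_idade vector (classifica_idade vector)

-- ===== LEMMAS AND PROOFS =====
-- A's inner loop over the 17 bins, for one element a, appends exactly B's chunk for a.
lemma pvInner_eq (acc : List String) (a : Int) :
    pvInnerA acc a =
      if 0 ≤ a ∧ a ≤ 110
      then acc ++ [PySem.List.pyGetD pvCatB (min (PySem.Int.floordiv a 5) 16) ""] else acc := by
  unfold pvInnerA
  rw [PySem.List.foldl_append_ite]
  have hr : PySem.List.pyRange 0 (PySem.List.len pvListaA) 1 =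
      [0,1,2,3,4,5,6,7,8,9,10,11,12,13,14,15,16] := by decide
  rw [hr]
  by_cases h : 0 ≤ a ∧ a ≤ 110
  · rw [if_pos h]
    obtain ⟨h1, h2⟩ := h
    have : ([0,1,2,3,4,5,6,7,8,9,10,11,12,13,14,15,16].filter
        (fun j => decide (a ≥ (PySem.List.pyGetD pvListaA j (0,0)).1 ∧
                          a ≤ (PySem.List.pyGetD pvListaA j (0,0)).2))).map
        (fun j => PySem.List.pyGetD pvCatA j "") =
        [PySem.List.pyGetD pvCatB (min (PySem.Int.floordiv a 5) 16) ""] := by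
      interval_cases a <;> decide
    rw [this]
  · rw [if_neg h]
    have hnil : ([0,1,2,3,4,5,6,7,8,9,10,11,12,13,14,15,16].filter
        (fun j => decide (a ≥ (PySem.List.pyGetD pvListaA j (0,0)).1 ∧
                          a ≤ (PySem.List.pyGetD pvListaA j (0,0)).2))) = ([] : List Int) := by
      apply List.filter_eq_nil_iff.mpr
      intro j hj
      have hjr : (0:Int) ≤ j ∧ j < 17 := by
        fin_cases hj <;> omega
      have h17 : pvListaA.length = 17 := by decide
      have hmem : PySem.List.pyGetD pvListaA j ((0:Int),(0:Int)) ∈ pvListaA :=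
        PySem.List.pyGetD_mem _ _ (by unfold PySem.Raise.InRange; rw [h17]; omega)
      have hb : ∀ p ∈ pvListaA, 0 ≤ p.1 ∧ p.2 ≤ 110 := by decide
      simp only [decide_eq_true_eq]
      rintro ⟨h1, h2⟩
      have hp := hb _ hmem
      exact h ⟨by omega, by omega⟩
    rw [hnil]; simp

-- ===== VERDICT (by name: the statement is the Claim_ definition above) =====
theorem classifica_idade_spec : Claim_equal_classifica_idade := by
  intro vector _
  unfold Spec_classifica_idade classifica_idade classifica_idade_alt
  rw [PySem.List.foldl_pyRange_zero_pyGetD]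
  exact PySem.List.foldl_congr_mem vector _ _ [] (fun acc x _ => pvInner_eq acc x)
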